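-- pv_equiv track=rewrite | github.com/v01dXYZ/vision-toolkit-2 | src/vision_toolkit/aoi/pattern_mining/spam.py | calculate_sequences_sizes
-- ===== SOURCE A (Python) =====
-- from typing import List
--
-- def calculate_sequences_sizes(sequences: List[List[List[int]]]):
--     bit_index = 0
--     sequences_sizes = [bit_index]
--     for sequence in sequences:
--         bit_index += len(sequence)
--         if sequence != sequences[-1]:
--             sequences_sizes.append(bit_index)
--     last_bit_index = bit_index - 1
--     return last_bit_index, sequences_sizes
-- ===== SOURCE B (Python) =====
-- def calculate_sequences_sizes(sequences):
--     # Two-pass: build the full prefix-offset table first, then filter.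
--     offsets = [0]
--     for sequence in sequences:
--         offsets.append(offsets[-1] + len(sequence))
--     if not sequences:
--         return -1, [0]
--     last = sequences[-1]
--     sizes = [0] + [o for s, o in zip(sequences, offsets[1:]) if s != last]
--     return offsets[-1] - 1, sizes
-- ===== Notes on version B (the rewrite author's own statement) =====
-- stated objective: alternative
-- what changed: A interleaves accumulation and filtering in one loop; B first builds the full prefix-offset table in one pass and then filters it against the last sequence in a second pass, with an explicit empty-input guard.
import Mathlib
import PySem

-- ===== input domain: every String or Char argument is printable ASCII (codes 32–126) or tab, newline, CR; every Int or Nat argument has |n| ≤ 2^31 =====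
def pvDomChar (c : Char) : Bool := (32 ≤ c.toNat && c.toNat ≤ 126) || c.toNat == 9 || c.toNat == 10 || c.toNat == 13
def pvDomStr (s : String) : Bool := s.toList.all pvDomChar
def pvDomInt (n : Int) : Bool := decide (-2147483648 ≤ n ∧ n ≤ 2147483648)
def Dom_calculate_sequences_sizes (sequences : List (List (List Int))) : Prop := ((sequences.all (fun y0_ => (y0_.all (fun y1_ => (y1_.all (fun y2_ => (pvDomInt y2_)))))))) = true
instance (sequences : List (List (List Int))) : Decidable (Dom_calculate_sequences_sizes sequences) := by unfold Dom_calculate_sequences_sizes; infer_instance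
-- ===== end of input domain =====

-- B builds the full prefix-offset table in a first pass and filters it in a second pass
-- (alternative decomposition, same cost); A interleaves both in one loop.

-- ===== PORT A =====
def calculate_sequences_sizes (sequences : List (List (List Int))) : Int × List Int :=
  -- bit_index = 0; sequences_sizes = [bit_index]; for sequence in sequences: …
  let r := sequences.foldl
    (fun (st : Int × List Int) sequence =>
      let bit_index := st.1 + (sequence.length : Int)
      let sizes := if PySem.List.pyGet? sequences (-1) ≠ some sequence
                   then st.2 ++ [bit_index] else st.2
      (bit_index, sizes))
    ((0 : Int), [(0 : Int)])
  (r.1 - 1, r.2)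

-- ===== PORT B =====
def calculate_sequences_sizes_alt (sequences : List (List (List Int))) : Int × List Int :=
  -- offsets = [0]; for sequence in sequences: offsets.append(offsets[-1] + len(sequence))
  let offsets := sequences.foldl
    (fun (offsets : List Int) sequence => offsets ++ [offsets.getLastD 0 + (sequence.length : Int)])
    [(0 : Int)]
  match sequences.getLast? with
  | none => (-1, [0])                 -- if not sequences: return -1, [0]
  | some last =>
    -- sizes = [0] + [o for s, o in zip(sequences, offsets[1:]) if s != last]
    let sizes := (0 : Int) :: ((sequences.zip (offsets.drop 1)).filterMap
        (fun p => if p.1 ≠ last then some p.2 else none))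
    (offsets.getLastD 0 - 1, sizes)

-- ===== PRECONDITION & SPEC =====
def Spec_calculate_sequences_sizes (sequences : List (List (List Int))) (out : Int × List Int) : Prop := out = calculate_sequences_sizes_alt sequences
instance (sequences : List (List (List Int))) (out : Int × List Int) : Decidable (Spec_calculate_sequences_sizes sequences out) := by unfold Spec_calculate_sequences_sizes; infer_instance

-- ===== CLAIM (what is proved, stated in full; the proofs are below) =====
def Claim_equal_calculate_sequences_sizes : Prop := ∀ (sequences : List (List (List Int))), Dom_calculate_sequences_sizes sequences → Spec_calculate_sequences_sizes sequences (calculate_sequences_sizes sequences)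

-- ===== LEMMAS AND PROOFS =====

/-- Total bit size of a list of sequences. -/
def pvSumL (xs : List (List (List Int))) : Int := (xs.map (fun s => (s.length : Int))).sum

/-- Offsets selected by `cond`, starting from running total `b` (the common shape of both loops). -/
def pvSel (cond : List (List Int) → Prop) [DecidablePred cond] (b : Int) :
    List (List (List Int)) → List Int
  | [] => []
  | s :: t => (if cond s then [b + (s.length : Int)] else []) ++ pvSel cond (b + (s.length : Int)) t

/-- All prefix offsets (B's table, without the leading 0). -/
def pvOffs (b : Int) : List (List (List Int)) → List Int
  | [] => []
  | s :: t => (b + (s.length : Int)) :: pvOffs (b + (s.length : Int)) t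

lemma pvSel_congr (c1 c2 : List (List Int) → Prop) [DecidablePred c1] [DecidablePred c2]
    (h : ∀ s, c1 s ↔ c2 s) : ∀ (xs : List (List (List Int))) (b : Int),
    pvSel c1 b xs = pvSel c2 b xs := by
  intro xs
  induction xs with
  | nil => intro b; rfl
  | cons s t ih =>
    intro b
    simp only [pvSel, ih]
    by_cases hc : c1 s
    · rw [if_pos hc, if_pos ((h s).mp hc)]
    · rw [if_neg hc, if_neg (fun hc2 => hc ((h s).mpr hc2))]

lemma pvFoldA (cond : List (List Int) → Prop) [DecidablePred cond] :
    ∀ (xs : List (List (List Int))) (b : Int) (l : List Int),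
    xs.foldl (fun (st : Int × List Int) sequence =>
      let bit_index := st.1 + (sequence.length : Int)
      let sizes := if cond sequence then st.2 ++ [bit_index] else st.2
      (bit_index, sizes)) (b, l)
    = (b + pvSumL xs, l ++ pvSel cond b xs) := by
  intro xs
  induction xs with
  | nil => intro b l; simp [pvSumL, pvSel]
  | cons s t ih =>
    intro b l
    simp only [List.foldl_cons, ih, pvSumL, pvSel, List.map_cons, List.sum_cons]
    rw [Prod.mk.injEq]
    constructor
    · ring
    · by_cases hc : cond s <;> simp [hc]

lemma pvFoldB : ∀ (xs : List (List (List Int))) (acc : List Int), acc ≠ [] →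
    xs.foldl (fun (offsets : List Int) sequence =>
      offsets ++ [offsets.getLastD 0 + (sequence.length : Int)]) acc
    = acc ++ pvOffs (acc.getLastD 0) xs := by
  intro xs
  induction xs with
  | nil => intro acc _; simp [pvOffs]
  | cons s t ih =>
    intro acc hacc
    simp only [List.foldl_cons]
    rw [ih (acc ++ [acc.getLastD 0 + (s.length : Int)]) (by simp)]
    simp [pvOffs]

lemma pvOffs_getLastD : ∀ (xs : List (List (List Int))), xs ≠ [] → ∀ (b d : Int),
    (pvOffs b xs).getLastD d = b + pvSumL xs := by
  intro xs
  induction xs with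
  | nil => intro h; exact absurd rfl h
  | cons s t ih =>
    intro _ b d
    rw [pvOffs, List.getLastD_cons]
    cases t with
    | nil => simp [pvOffs, pvSumL]
    | cons u v =>
      rw [ih (by simp)]
      simp [pvSumL]; ring

lemma pvZipOffs (last : List (List Int)) : ∀ (xs : List (List (List Int))) (b : Int),
    (xs.zip (pvOffs b xs)).filterMap (fun p => if p.1 ≠ last then some p.2 else none)
    = pvSel (fun s => s ≠ last) b xs := by
  intro xs
  induction xs with
  | nil => intro b; rfl
  | cons s t ih =>
    intro b
    simp only [pvOffs, List.zip_cons_cons, List.filterMap_cons, pvSel, ih]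
    by_cases hc : s ≠ last <;> simp [hc]

-- ===== VERDICT (by name: the statement is the Claim_ definition above) =====
theorem calculate_sequences_sizes_spec : Claim_equal_calculate_sequences_sizes := by
  intro sequences _
  unfold Spec_calculate_sequences_sizes calculate_sequences_sizes calculate_sequences_sizes_alt
  cases h : sequences.getLast? with
  | none =>
    have he : sequences = [] := List.getLast?_eq_none_iff.mp h
    subst he; rfl
  | some last =>
    have hne : sequences ≠ [] := by
      intro he; subst he; simp at h
    rw [pvFoldA (fun sequence => PySem.List.pyGet? sequences (-1) ≠ some sequence) sequences 0 [0],
        pvFoldB sequences [0] (by simp)]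
    have hb : (([(0:Int)] : List Int).getLastD 0) = 0 := rfl
    rw [hb]
    have hlast : (((0:Int) :: pvOffs 0 sequences)).getLastD 0 = pvSumL sequences := by
      rw [List.getLastD_cons]
      cases sequences with
      | nil => exact absurd rfl hne
      | cons s t =>
        rw [pvOffs_getLastD (s :: t) (by simp) 0 0]
        ring
    simp only [List.singleton_append, List.drop_succ_cons, List.drop_zero]
    rw [pvZipOffs last sequences 0]
    rw [pvSel_congr (fun sequence => PySem.List.pyGet? sequences (-1) ≠ some sequence)
          (fun s => s ≠ last)
          (by intro s; rw [PySem.List.pyGet?_neg_one, h]; simp [eq_comm])]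
    rw [hlast, Prod.mk.injEq]
    exact ⟨by ring, rfl⟩
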